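-- pv_equiv track=rewrite | github.com/grotyx/research-graphDB | src/builder/pubmed_bulk_processor.py | _infer_evidence_level
-- ===== SOURCE A (Python) =====
-- def _infer_evidence_level(publication_types: list[str]) -> str:
--     """Publication types에서 근거 수준 추론."""
--     types_lower = [pt.lower() for pt in publication_types]
--
--     if any("meta-analysis" in pt for pt in types_lower):
--         return "1a"
--     elif any("systematic review" in pt for pt in types_lower):
--         return "1a"
--     elif any("randomized controlled trial" in pt for pt in types_lower):
--         return "1b"
--     elif any("clinical trial" in pt for pt in types_lower):
--         return "2b"
--     elif any("cohort" in pt for pt in types_lower):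
--         return "2b"
--     elif any("case-control" in pt for pt in types_lower):
--         return "3"
--     elif any("case report" in pt for pt in types_lower):
--         return "4"
--     elif any("review" in pt for pt in types_lower):
--         return "5"
--
--     return "5"  # Default: Expert opinion / Unknown
-- ===== SOURCE B (Python) =====
-- # Inverted traversal: instead of eight ordered any()-scans over the whole list,
-- # compute each publication type's best keyword rank once and keep a running
-- # minimum, then map the winning rank to its evidence level.
-- _KEYWORDS = ["meta-analysis", "systematic review", "randomized controlled trial",
--              "clinical trial", "cohort", "case-control", "case report", "review"]
-- _LEVELS = ["1a", "1a", "1b", "2b", "2b", "3", "4", "5"]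
--
--
-- def _rank(low):
--     i = 0
--     for kw in _KEYWORDS:
--         if kw in low:
--             return i
--         i += 1
--     return i
--
--
-- def _infer_evidence_level(publication_types: list[str]) -> str:
--     best = len(_KEYWORDS)
--     for pt in publication_types:
--         r = _rank(pt.lower())
--         if r < best:
--             best = r
--     return _LEVELS[best] if best < len(_LEVELS) else "5"
-- ===== Notes on version B (the rewrite author's own statement) =====
-- stated objective: alternative
-- what changed: Inverts the traversal: instead of eight ordered any()-scans of the whole list (one per keyword), B makes a single pass over the publication types, computing each string's best keyword rank and keeping a running minimum, then maps the winning rank to its level; correctness rests on first-matching-keyword-over-the-list = minimum over per-string first matches.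
import Mathlib
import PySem

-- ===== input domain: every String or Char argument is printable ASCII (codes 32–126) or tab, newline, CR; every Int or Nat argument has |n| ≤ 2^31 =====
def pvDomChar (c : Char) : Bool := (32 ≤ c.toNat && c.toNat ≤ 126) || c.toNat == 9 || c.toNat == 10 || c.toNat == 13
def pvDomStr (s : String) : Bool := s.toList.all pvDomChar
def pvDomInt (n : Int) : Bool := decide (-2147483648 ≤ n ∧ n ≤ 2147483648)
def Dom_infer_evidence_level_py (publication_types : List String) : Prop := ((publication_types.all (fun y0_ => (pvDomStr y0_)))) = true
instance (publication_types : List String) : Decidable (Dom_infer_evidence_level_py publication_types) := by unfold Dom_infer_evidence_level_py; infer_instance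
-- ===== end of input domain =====

-- B inverts the traversal: one pass over the publication types keeping the minimum keyword rank, then a rank->level table lookup; objective: alternative (same cost, different algorithm).


-- ===== PORT A =====
def infer_evidence_level_py (publication_types : List String) : String :=
  let types_lower := publication_types.map (fun pt => PySem.Str.lower pt)
  if types_lower.any (fun pt => PySem.Str.isIn "meta-analysis" pt) then "1a"
  else if types_lower.any (fun pt => PySem.Str.isIn "systematic review" pt) then "1a"
  else if types_lower.any (fun pt => PySem.Str.isIn "randomized controlled trial" pt) then "1b"
  else if types_lower.any (fun pt => PySem.Str.isIn "clinical trial" pt) then "2b"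
  else if types_lower.any (fun pt => PySem.Str.isIn "cohort" pt) then "2b"
  else if types_lower.any (fun pt => PySem.Str.isIn "case-control" pt) then "3"
  else if types_lower.any (fun pt => PySem.Str.isIn "case report" pt) then "4"
  else if types_lower.any (fun pt => PySem.Str.isIn "review" pt) then "5"
  else "5"

-- ===== PORT B =====
def pvKeywords : List String :=
  ["meta-analysis", "systematic review", "randomized controlled trial",
   "clinical trial", "cohort", "case-control", "case report", "review"]

def pvLevels : List String := ["1a", "1a", "1b", "2b", "2b", "3", "4", "5"]

-- _rank: first keyword index contained in `low`, else the running counter (= length)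
def pvRankAux (low : String) (i : Nat) : List String → Nat
  | [] => i
  | kw :: rest => if PySem.Str.isIn kw low then i else pvRankAux low (i + 1) rest

def pvRank (low : String) : Nat := pvRankAux low 0 pvKeywords

def infer_evidence_level_py_alt (publication_types : List String) : String :=
  let best := publication_types.foldl
    (fun b pt => let r := pvRank (PySem.Str.lower pt); if r < b then r else b)
    pvKeywords.length
  -- best < pvLevels.length guards the index, so getD's default is never used (faithful to _LEVELS[best])
  if best < pvLevels.length then pvLevels.getD best "" else "5"

-- ===== PRECONDITION & SPEC =====
def Spec_infer_evidence_level_py (publication_types : List String) (out : String) : Prop := out = infer_evidence_level_py_alt publication_types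
instance (publication_types : List String) (out : String) : Decidable (Spec_infer_evidence_level_py publication_types out) := by unfold Spec_infer_evidence_level_py; infer_instance

-- ===== CLAIM =====
def Claim_equal_infer_evidence_level_py : Prop := ∀ (publication_types : List String), Dom_infer_evidence_level_py publication_types → Spec_infer_evidence_level_py publication_types (infer_evidence_level_py publication_types)

-- ===== LEMMAS AND PROOFS =====

-- first keyword index (counting from i) matched by ANY publication type, else i + length
def pvChainAux (pts : List String) (i : Nat) : List String → Nat
  | [] => i
  | kw :: rest =>
      if pts.any (fun p => PySem.Str.isIn kw (PySem.Str.lower p)) then i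
      else pvChainAux pts (i + 1) rest

theorem pvRankAux_ge (low : String) (kws : List String) (i : Nat) :
    i ≤ pvRankAux low i kws := by
  induction kws generalizing i with
  | nil => simp [pvRankAux]
  | cons kw rest ih =>
      simp only [pvRankAux]
      split_ifs
      · exact le_refl i
      · exact le_trans (Nat.le_succ i) (ih (i + 1))

theorem pvChainAux_ge (pts : List String) (kws : List String) (i : Nat) :
    i ≤ pvChainAux pts i kws := by
  induction kws generalizing i with
  | nil => simp [pvChainAux]
  | cons kw rest ih =>
      simp only [pvChainAux]
      split_ifs
      · exact le_refl i
      · exact le_trans (Nat.le_succ i) (ih (i + 1))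

theorem pvChainAux_le (pts : List String) (kws : List String) (i : Nat) :
    pvChainAux pts i kws ≤ i + kws.length := by
  induction kws generalizing i with
  | nil => simp [pvChainAux]
  | cons kw rest ih =>
      simp only [pvChainAux, List.length_cons]
      split_ifs
      · omega
      · have := ih (i + 1); omega

-- KEY: the first keyword matched by any string of p::ps is the min of
-- p's first match and the first match over ps.
theorem pvChainAux_cons (p : String) (ps : List String) (kws : List String) (i : Nat) :
    pvChainAux (p :: ps) i kws
      = min (pvRankAux (PySem.Str.lower p) i kws) (pvChainAux ps i kws) := by
  induction kws generalizing i with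
  | nil => simp [pvChainAux, pvRankAux]
  | cons kw rest ih =>
      simp only [pvChainAux, pvRankAux, List.any_cons]
      by_cases hc : PySem.Str.isIn kw (PySem.Str.lower p) = true
      · by_cases hd : (ps.any fun q => PySem.Str.isIn kw (PySem.Str.lower q)) = true
        · simp only [hc, hd, Bool.true_or, if_true]
          omega
        · simp only [hc, Bool.true_or, if_true, hd, Bool.not_eq_true] at *
          simp only [Bool.false_eq_true, if_false]
          have := pvChainAux_ge ps rest (i + 1)
          omega
      · by_cases hd : (ps.any fun q => PySem.Str.isIn kw (PySem.Str.lower q)) = true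
        · simp only [Bool.not_eq_true] at hc
          simp only [hc, Bool.false_or, hd, if_true, Bool.false_eq_true, if_false]
          have := pvRankAux_ge (PySem.Str.lower p) rest (i + 1)
          omega
        · simp only [Bool.not_eq_true] at hc hd
          simp only [hc, hd, Bool.false_or, Bool.false_eq_true, if_false]
          exact ih (i + 1)

-- the fold in B computes min b (first keyword index matched by any string)
theorem pvFold_eq (pts : List String) (b : Nat) (hb : b ≤ 8) :
    pts.foldl (fun b pt => let r := pvRank (PySem.Str.lower pt); if r < b then r else b) b
      = min b (pvChainAux pts 0 pvKeywords) := by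
  induction pts generalizing b with
  | nil =>
      have h8 : pvChainAux ([] : List String) 0 pvKeywords = 8 := rfl
      simp [h8, Nat.min_eq_left hb]
  | cons p ps ih =>
      simp only [List.foldl_cons]
      have hstep : (let r := pvRank (PySem.Str.lower p); if r < b then r else b)
          = min b (pvRank (PySem.Str.lower p)) := by
        simp only []
        split_ifs <;> omega
      rw [hstep, ih (min b (pvRank (PySem.Str.lower p))) (le_trans (Nat.min_le_left _ _) hb)]
      rw [pvChainAux_cons]
      have : pvRank (PySem.Str.lower p) = pvRankAux (PySem.Str.lower p) 0 pvKeywords := rfl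
      rw [this, Nat.min_assoc]

-- ===== VERDICT =====
theorem infer_evidence_level_py_spec : Claim_equal_infer_evidence_level_py := by
  intro pts _
  unfold Spec_infer_evidence_level_py infer_evidence_level_py infer_evidence_level_py_alt
  have hlen : pvKeywords.length = 8 := rfl
  rw [hlen, pvFold_eq pts 8 (le_refl 8)]
  have hle : pvChainAux pts 0 pvKeywords ≤ 8 := by
    have := pvChainAux_le pts pvKeywords 0
    simpa [pvKeywords] using this
  rw [Nat.min_eq_right hle, show pvLevels.length = 8 from rfl]
  simp only [pvChainAux, pvKeywords, List.any_map, Function.comp_def]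
  split_ifs <;> first | rfl | omega
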